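-- pv_equiv track=rewrite | github.com/ChristianWitts/glowing-couscous | AdventOfCode/2018/21/d2.py | run_activation_system
-- ===== SOURCE A (Python) =====
-- def run_activation_system(magic_number, is_part_1):
--     seen = set()
--     c = 0
--     last_unique_c = -1
--
--     while True:
--         a = c | 65536
--         c = magic_number
--
--         while True:
--             c = (((c + (a & 255)) & 16777215) * 65899) & 16777215
--
--             if 256 > a:
--                 if is_part_1:
--                     return c
--                 else:
--                     if c not in seen:
--                         seen.add(c)
--                         last_unique_c = c
--                         break
--                     else:
--                         return last_unique_c
--             else:
--                 a //= 256
-- ===== SOURCE B (Python) =====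
-- def step(magic_number, c):
--     a = c | 65536
--     c = magic_number
--     while True:
--         c = (((c + (a & 255)) & 16777215) * 65899) & 16777215
--         if a < 256:
--             return c
--         a //= 256
--
--
-- def run_activation_system(magic_number, is_part_1):
--     first = step(magic_number, 0)
--     if is_part_1:
--         return first
--
--     # Floyd cycle detection on the iteration x -> step(x) from the first value.
--     tortoise = step(magic_number, first)
--     hare = step(magic_number, tortoise)
--     while tortoise != hare:
--         tortoise = step(magic_number, tortoise)
--         hare = step(magic_number, step(magic_number, hare))
--
--     # find mu: first repeated value of the generated sequence
--     tortoise = first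
--     while tortoise != hare:
--         tortoise = step(magic_number, tortoise)
--         hare = step(magic_number, hare)
--
--     # answer = cycle predecessor of the first repeated value
--     x = tortoise
--     while step(magic_number, x) != tortoise:
--         x = step(magic_number, x)
--     return x
-- ===== Notes on version B (the rewrite author's own statement) =====
-- stated objective: alternative
-- what changed: B factors the byte-folding inner loop into a pure step() function and replaces A's growing seen-set cycle detection for part 2 by Floyd's constant-space tortoise-and-hare cycle detection, returning the cycle predecessor of the first repeated generated value.
import Mathlib
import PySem

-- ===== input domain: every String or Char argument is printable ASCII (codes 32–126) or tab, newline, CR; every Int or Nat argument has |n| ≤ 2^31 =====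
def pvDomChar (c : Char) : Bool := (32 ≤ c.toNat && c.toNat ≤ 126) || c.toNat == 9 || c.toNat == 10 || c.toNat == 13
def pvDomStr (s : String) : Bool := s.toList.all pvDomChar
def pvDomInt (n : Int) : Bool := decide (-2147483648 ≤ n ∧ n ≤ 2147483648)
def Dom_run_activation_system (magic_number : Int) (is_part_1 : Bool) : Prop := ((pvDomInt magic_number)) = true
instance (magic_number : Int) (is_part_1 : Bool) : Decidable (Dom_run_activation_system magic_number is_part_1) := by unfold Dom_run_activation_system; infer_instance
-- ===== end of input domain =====

-- B replaces A's growing seen-set cycle detection by Floyd's two-pointer, O(1)-memory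
-- cycle detection over a factored-out pure step function; objective: alternative.

-- ===== PORT A =====
-- the inner `while True` of A: repeatedly fold a byte of `a` into `c` until 256 > a
def pvInnerA (a c : Int) : Int :=
  let c' := PySem.Int.band (PySem.Int.band (c + PySem.Int.band a 255) 16777215 * 65899) 16777215
  if a < 256 then c'
  else pvInnerA (PySem.Int.floordiv a 256) c'
termination_by a.toNat
decreasing_by
  rw [PySem.Int.floordiv_eq_ediv_of_pos (by norm_num : (0:Int) < 256)]
  omega

-- the outer `while True` of A; fuel makes the loop total (proved sufficient below)
def pvOuterA (magic : Int) (p1 : Bool) (seen : PySem.Set Int) (c last : Int) : Nat → Int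
  | 0 => last
  | fuel + 1 =>
    let c' := pvInnerA (PySem.Int.bor c 65536) magic
    if p1 then c'
    else if PySem.Set.contains seen c' = false then
      pvOuterA magic p1 (PySem.Set.add seen c') c' c' fuel
    else last

def run_activation_system (magic_number : Int) (is_part_1 : Bool) : Int :=
  pvOuterA magic_number is_part_1 PySem.Set.empty 0 (-1) 16777218

-- ===== PORT B =====
-- B's pure helper step(magic, c): the a = c | 65536 byte loop, returning the next value
def pvStepGo (a c : Int) : Int :=
  let c' := PySem.Int.band (PySem.Int.band (c + PySem.Int.band a 255) 16777215 * 65899) 16777215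
  if a < 256 then c'
  else pvStepGo (PySem.Int.floordiv a 256) c'
termination_by a.toNat
decreasing_by
  rw [PySem.Int.floordiv_eq_ediv_of_pos (by norm_num : (0:Int) < 256)]
  omega

def pvStep (magic c : Int) : Int := pvStepGo (PySem.Int.bor c 65536) magic

-- Floyd phase 1: tortoise/hare until they meet (fuel proved sufficient below)
def pvMeet (magic t h : Int) : Nat → Int
  | 0 => t
  | fuel + 1 =>
    if t = h then t
    else pvMeet magic (pvStep magic t) (pvStep magic (pvStep magic h)) fuel

-- Floyd phase 2: walk both pointers to the first repeated generated value
def pvFindMu (magic t h : Int) : Nat → Int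
  | 0 => t
  | fuel + 1 =>
    if t = h then t
    else pvFindMu magic (pvStep magic t) (pvStep magic h) fuel

-- walk the cycle to the predecessor of the first repeated value
def pvPred (magic v x : Int) : Nat → Int
  | 0 => x
  | fuel + 1 =>
    if pvStep magic x = v then x
    else pvPred magic v (pvStep magic x) fuel

def run_activation_system_alt (magic_number : Int) (is_part_1 : Bool) : Int :=
  let first := pvStep magic_number 0
  if is_part_1 then first
  else
    let meet := pvMeet magic_number (pvStep magic_number first)
      (pvStep magic_number (pvStep magic_number first)) 16777218
    let vmu := pvFindMu magic_number first meet 16777218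
    pvPred magic_number vmu vmu 16777218

-- ===== PRECONDITION & SPEC =====
def Spec_run_activation_system (magic_number : Int) (is_part_1 : Bool) (out : Int) : Prop := out = run_activation_system_alt magic_number is_part_1
instance (magic_number : Int) (is_part_1 : Bool) (out : Int) : Decidable (Spec_run_activation_system magic_number is_part_1 out) := by unfold Spec_run_activation_system; infer_instance

-- ===== CLAIM (what is proved, stated in full; the proofs are below) =====
def Claim_equal_run_activation_system : Prop := ∀ (magic_number : Int) (is_part_1 : Bool), Dom_run_activation_system magic_number is_part_1 → Spec_run_activation_system magic_number is_part_1 (run_activation_system magic_number is_part_1)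

-- ===== LEMMAS AND PROOFS =====

-- the generated sequence: g n = step^[n] (step magic 0)
def pvG (magic : Int) (n : Nat) : Int := (pvStep magic)^[n] (pvStep magic 0)

-- (mu, lam): least eventual-period parameters of the generated sequence
def pvSpecLM (magic : Int) (mu lam : Nat) : Prop :=
  0 < lam ∧ pvG magic (mu + lam) = pvG magic mu ∧
  (∀ k, 0 < k → (∃ n, pvG magic (n + k) = pvG magic n) → lam ≤ k) ∧
  (∀ n, pvG magic (n + lam) = pvG magic n → mu ≤ n)

theorem pvInnerA_eq_pvStepGo (a c : Int) : pvInnerA a c = pvStepGo a c := by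
  fun_induction pvInnerA a c with
  | case1 a c c' h => rw [pvStepGo, if_pos h]
  | case2 a c c' h ih => rw [pvStepGo, if_neg h]; exact ih


theorem pvMaskBounds (x : Int) :
    0 ≤ PySem.Int.band x 16777215 ∧ PySem.Int.band x 16777215 < 16777216 := by
  unfold PySem.Int.band
  split_ifs with h1 h2 h2 <;> try (exfalso; omega)
  · have hr := Nat.and_le_right (n := x.toNat) (m := (16777215 : Int).toNat)
    constructor
    · exact Int.natCast_nonneg _
    · have : ((16777215 : Int)).toNat = 16777215 := rfl
      omega
  · have hl := Nat.and_le_left (n := (16777215 : Int).toNat) (m := (-x - 1).toNat)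
    have : ((16777215 : Int)).toNat = 16777215 := rfl
    constructor
    · exact Int.natCast_nonneg _
    · omega

theorem pvStepGo_bounds (a c : Int) : 0 ≤ pvStepGo a c ∧ pvStepGo a c < 16777216 := by
  fun_induction pvStepGo a c with
  | case1 a c c' h => exact pvMaskBounds _
  | case2 a c c' h ih => exact ih

theorem pvStep_bounds (magic c : Int) : 0 ≤ pvStep magic c ∧ pvStep magic c < 16777216 :=
  pvStepGo_bounds _ _

theorem pvG_bounds (magic : Int) (n : Nat) : 0 ≤ pvG magic n ∧ pvG magic n < 16777216 := by
  induction n with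
  | zero => exact pvStep_bounds magic 0
  | succ n ih => rw [pvG, Function.iterate_succ_apply']; exact pvStep_bounds magic _

theorem pvG_succ (magic : Int) (n : Nat) : pvG magic (n + 1) = pvStep magic (pvG magic n) :=
  Function.iterate_succ_apply' _ _ _

theorem pvG_add (magic : Int) (k n : Nat) :
    pvG magic (k + n) = (pvStep magic)^[k] (pvG magic n) :=
  Function.iterate_add_apply _ _ _ _

theorem pvG_collision (magic : Int) :
    ∃ i j, i < j ∧ j ≤ 16777216 ∧ pvG magic i = pvG magic j := by
  have hmap : ∀ i ∈ Finset.range 16777217, pvG magic i ∈ Finset.Icc (0:Int) 16777215 := by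
    intro i _
    have := pvG_bounds magic i
    simp only [Finset.mem_Icc]
    omega
  have hcard : (Finset.Icc (0:Int) 16777215).card < (Finset.range 16777217).card := by
    rw [Int.card_Icc, Finset.card_range]
    norm_num
  obtain ⟨i, hi, j, hj, hne, heq⟩ := Finset.exists_ne_map_eq_of_card_lt_of_maps_to hcard hmap
  simp only [Finset.mem_range] at hi hj
  rcases Nat.lt_or_ge i j with hlt | hge
  · exact ⟨i, j, hlt, by omega, heq⟩
  · exact ⟨j, i, by omega, by omega, heq.symm⟩


theorem pvSpecLM_exists (magic : Int) : ∃ mu lam, pvSpecLM magic mu lam := by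
  classical
  obtain ⟨i, j, hij, hj, heq⟩ := pvG_collision magic
  have hT : ∃ k, 0 < k ∧ ∃ n, pvG magic (n + k) = pvG magic n :=
    ⟨j - i, by omega, i, by rw [show i + (j - i) = j by omega]; exact heq.symm⟩
  obtain ⟨hlam0, n1, hn1⟩ := Nat.find_spec hT
  have hQ : ∃ n, pvG magic (n + Nat.find hT) = pvG magic n := ⟨n1, hn1⟩
  refine ⟨Nat.find hQ, Nat.find hT, hlam0, Nat.find_spec hQ, ?_, ?_⟩
  · intro k hk hex; exact Nat.find_min' hT ⟨hk, hex⟩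
  · intro n hn; exact Nat.find_min' hQ hn


theorem pv_per_ge (magic : Int) (mu lam : Nat) (h : pvSpecLM magic mu lam) :
    ∀ n, mu ≤ n → pvG magic (n + lam) = pvG magic n := by
  obtain ⟨hl, hper, hlmin, hmumin⟩ := h
  intro n hn
  induction n, hn using Nat.le_induction with
  | base => exact hper
  | succ n hn ih =>
    rw [show n + 1 + lam = (n + lam) + 1 by omega, pvG_succ, ih, ← pvG_succ]


theorem pv_per_mul (magic : Int) (mu lam : Nat) (h : pvSpecLM magic mu lam) :
    ∀ q n, mu ≤ n → pvG magic (n + q * lam) = pvG magic n := by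
  intro q n hn
  induction q with
  | zero => simp
  | succ q ih =>
    rw [show n + (q + 1) * lam = (n + q * lam) + lam by ring,
      pv_per_ge magic mu lam h _ (le_trans hn (Nat.le_add_right _ _)), ih]


theorem pv_ge_mu_of_eq (magic : Int) (mu lam : Nat) (h : pvSpecLM magic mu lam) :
    ∀ i j, i < j → pvG magic i = pvG magic j → mu ≤ i := by
  intro i j hij heq
  have hstep : ∀ t, pvG magic (i + t * (j - i)) = pvG magic i := by
    intro t
    induction t with
    | zero => simp
    | succ t ih =>
      rw [show i + (t + 1) * (j - i) = (j - i) + (i + t * (j - i)) by ring, pvG_add, ih,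
        ← pvG_add, show (j - i) + i = j by omega]
      exact heq.symm
  obtain ⟨hl, hper, hlmin, hmumin⟩ := h
  by_contra hlt
  push_neg at hlt
  have hge : mu ≤ i + mu * (j - i) := by
    have h1 : mu ≤ mu * (j - i) := Nat.le_mul_of_pos_right _ (by omega)
    omega
  have h1 : pvG magic (i + mu * (j - i) + lam) = pvG magic (i + mu * (j - i)) :=
    pv_per_ge magic mu lam ⟨hl, hper, hlmin, hmumin⟩ _ hge
  rw [show i + mu * (j - i) + lam = lam + (i + mu * (j - i)) by omega, pvG_add, hstep mu] at h1
  have h2 : pvG magic (i + lam) = pvG magic i := by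
    rw [show i + lam = lam + i by omega, pvG_add]
    exact h1
  exact absurd (hmumin i h2) (by omega)


theorem pv_dvd_of_eq (magic : Int) (mu lam : Nat) (h : pvSpecLM magic mu lam) :
    ∀ i j, mu ≤ i → i ≤ j → pvG magic i = pvG magic j → lam ∣ (j - i) := by
  intro i j hmui hij heq
  obtain ⟨hl, hper, hlmin, hmumin⟩ := h
  rcases Nat.eq_zero_or_pos ((j - i) % lam) with h0 | hr0
  · exact Nat.dvd_of_mod_eq_zero h0
  · exfalso
    have hdm : lam * ((j - i) / lam) + (j - i) % lam = j - i := Nat.div_add_mod _ _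
    have hcomm : lam * ((j - i) / lam) = ((j - i) / lam) * lam := by ring
    have hji : j = (i + (j - i) % lam) + ((j - i) / lam) * lam := by omega
    have h2 : pvG magic ((i + (j - i) % lam) + (j - i) / lam * lam) = pvG magic (i + (j - i) % lam) :=
      pv_per_mul magic mu lam ⟨hl, hper, hlmin, hmumin⟩ _ _ (by omega)
    rw [← hji] at h2
    have h3 : pvG magic (i + (j - i) % lam) = pvG magic i := by rw [← h2, heq]
    have := hlmin _ hr0 ⟨i, h3⟩
    have := Nat.mod_lt (j - i) hl
    omega


theorem pv_inj (magic : Int) (mu lam : Nat) (h : pvSpecLM magic mu lam) :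
    ∀ i j, i < j → j < mu + lam → pvG magic i ≠ pvG magic j := by
  intro i j hij hjlt heq
  have hmui := pv_ge_mu_of_eq magic mu lam h i j hij heq
  have hdvd := pv_dvd_of_eq magic mu lam h i j hmui (le_of_lt hij) heq
  obtain ⟨hl, _, _, _⟩ := h
  have := Nat.le_of_dvd (by omega) hdvd
  omega


theorem pv_mulam_le (magic : Int) (mu lam : Nat) (h : pvSpecLM magic mu lam) :
    mu + lam ≤ 16777216 := by
  obtain ⟨i, j, hij, hj, heq⟩ := pvG_collision magic
  by_contra hlt
  push_neg at hlt
  exact pv_inj magic mu lam h i j hij (by omega) heq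


-- A's outer loop returns g (mu+lam-1)
theorem pvOuterA_inv (magic : Int) (mu lam : Nat) (h : pvSpecLM magic mu lam) :
    ∀ fuel i (seen : PySem.Set Int) c last,
      pvStep magic c = pvG magic i →
      (∀ x, x ∈ seen ↔ ∃ j, j < i ∧ pvG magic j = x) →
      (0 < i → last = pvG magic (i - 1)) →
      i ≤ mu + lam → mu + lam - i < fuel →
      pvOuterA magic false seen c last fuel = pvG magic (mu + lam - 1) := by
  intro fuel
  induction fuel with
  | zero => intro i seen c last _ _ _ hle hfuel; omega
  | succ fuel ih =>
    intro i seen c last hc hseen hlast hle hfuel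
    have hc' : pvInnerA (PySem.Int.bor c 65536) magic = pvG magic i := by
      rw [pvInnerA_eq_pvStepGo]; exact hc
    by_cases hcase : i = mu + lam
    · have hmem : pvG magic i ∈ seen := by
        rw [hseen]
        exact ⟨mu, by have := h.1; omega, by rw [hcase]; exact h.2.1.symm⟩
      have hcont : PySem.Set.contains seen (pvG magic i) = true :=
        (PySem.Set.contains_iff _ _).mpr hmem
      simp only [pvOuterA, hc', hcont, Bool.false_eq_true, if_false, Bool.true_eq_false]
      rw [hlast (by have := h.1; omega), hcase]
    · have hilt : i < mu + lam := by omega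
      have hnmem : pvG magic i ∉ seen := by
        rw [hseen]
        rintro ⟨j, hj, hjeq⟩
        exact pv_inj magic mu lam h j i hj hilt hjeq
      have hcont : PySem.Set.contains seen (pvG magic i) = false := by
        rw [Bool.eq_false_iff]
        intro hcon
        exact hnmem ((PySem.Set.contains_iff _ _).mp hcon)
      simp only [pvOuterA, hc', hcont, Bool.false_eq_true, if_false, if_true]
      apply ih (i + 1) (PySem.Set.add seen (pvG magic i)) (pvG magic i) (pvG magic i)
      · exact (pvG_succ magic i).symm
      · intro x
        rw [PySem.Set.mem_add, hseen]
        constructor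
        · rintro (⟨j, hj, hje⟩ | hxe)
          · exact ⟨j, by omega, hje⟩
          · exact ⟨i, by omega, hxe.symm⟩
        · rintro ⟨j, hj, hje⟩
          rcases Nat.lt_or_ge j i with hji | hji
          · exact Or.inl ⟨j, hji, hje⟩
          · exact Or.inr (by rw [← hje, show j = i by omega])
      · intro _; simp
      · omega
      · omega

theorem pvA_part2 (magic : Int) (mu lam : Nat) (h : pvSpecLM magic mu lam) :
    run_activation_system magic false = pvG magic (mu + lam - 1) := by
  unfold run_activation_system
  apply pvOuterA_inv magic mu lam h 16777218 0 PySem.Set.empty 0 (-1)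
  · rfl
  · intro x
    constructor
    · rintro ⟨⟩
    · rintro ⟨j, hj, -⟩; omega
  · intro h0; omega
  · exact Nat.zero_le _
  · have := pv_mulam_le magic mu lam h; omega

theorem pvMeet_inv (magic : Int) (mu lam mt : Nat) (_h : pvSpecLM magic mu lam)
    (hmt1 : 1 ≤ mt) (hmteq : pvG magic (2 * mt) = pvG magic mt)
    (hmtmin : ∀ j, 1 ≤ j → pvG magic (2 * j) = pvG magic j → mt ≤ j) :
    ∀ fuel i, 1 ≤ i → i ≤ mt → mt - i < fuel →
      pvMeet magic (pvG magic i) (pvG magic (2 * i)) fuel = pvG magic mt := by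
  intro fuel
  induction fuel with
  | zero => intro i _ _ hfuel; omega
  | succ fuel ih =>
    intro i hi1 hile hfuel
    rw [pvMeet]
    by_cases heq : pvG magic i = pvG magic (2 * i)
    · rw [if_pos heq, show i = mt by have := hmtmin i hi1 heq.symm; omega]
    · rw [if_neg heq]
      have hne : i ≠ mt := by rintro rfl; exact heq hmteq.symm
      have e1 : pvStep magic (pvG magic i) = pvG magic (i + 1) := (pvG_succ magic i).symm
      have e2 : pvStep magic (pvStep magic (pvG magic (2 * i))) = pvG magic (2 * (i + 1)) := by
        rw [show 2 * (i + 1) = 2 * i + 1 + 1 by ring, pvG_succ, pvG_succ]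
      rw [e1, e2]
      exact ih (i + 1) (by omega) (by omega) (by omega)

theorem pvFindMu_inv (magic : Int) (mu lam mt : Nat) (h : pvSpecLM magic mu lam)
    (hmt1 : 1 ≤ mt) (hdvd : lam ∣ mt) :
    ∀ fuel j, j ≤ mu → mu - j < fuel →
      pvFindMu magic (pvG magic j) (pvG magic (j + mt)) fuel = pvG magic mu := by
  intro fuel
  induction fuel with
  | zero => intro j _ hfuel; omega
  | succ fuel ih =>
    intro j hj hfuel
    rw [pvFindMu]
    by_cases heq : pvG magic j = pvG magic (j + mt)
    · have : ¬ j < mu := fun hlt => by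
        have := pv_ge_mu_of_eq magic mu lam h j (j + mt) (by omega) heq
        omega
      rw [if_pos heq, show j = mu by omega]
    · rw [if_neg heq]
      have hjlt : j < mu := by
        rcases Nat.eq_or_lt_of_le hj with heqj | hlt
        · exfalso
          obtain ⟨q, hq⟩ := hdvd
          apply heq
          rw [heqj, hq, show mu + lam * q = mu + q * lam by ring]
          exact (pv_per_mul magic mu lam h q mu (le_refl _)).symm
        · exact hlt
      have e1 : pvStep magic (pvG magic j) = pvG magic (j + 1) := (pvG_succ magic j).symm
      have e2 : pvStep magic (pvG magic (j + mt)) = pvG magic (j + 1 + mt) := by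
        rw [show j + 1 + mt = (j + mt) + 1 by ring, pvG_succ]
      rw [e1, e2]
      exact ih (j + 1) (by omega) (by omega)

theorem pvPred_inv (magic : Int) (mu lam : Nat) (h : pvSpecLM magic mu lam) :
    ∀ fuel k, k < lam → lam - 1 - k < fuel →
      pvPred magic (pvG magic mu) (pvG magic (mu + k)) fuel = pvG magic (mu + lam - 1) := by
  intro fuel
  induction fuel with
  | zero => intro k _ hfuel; have := h.1; omega
  | succ fuel ih =>
    intro k hk hfuel
    rw [pvPred]
    by_cases hc : pvStep magic (pvG magic (mu + k)) = pvG magic mu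
    · have hc' : pvG magic (mu + k + 1) = pvG magic mu := by rw [pvG_succ]; exact hc
      have hkl : k + 1 = lam := by
        by_contra hne
        exact pv_inj magic mu lam h mu (mu + k + 1) (by omega) (by omega) hc'.symm
      rw [if_pos hc, show mu + lam - 1 = mu + k by omega]
    · rw [if_neg hc]
      have hne : k + 1 ≠ lam := by
        intro he
        apply hc
        have : pvG magic (mu + k + 1) = pvG magic mu := by
          rw [show mu + k + 1 = mu + lam by omega]; exact h.2.1
        rw [← this, pvG_succ]
      have e : pvStep magic (pvG magic (mu + k)) = pvG magic (mu + (k + 1)) := by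
        rw [show mu + (k + 1) = (mu + k) + 1 by ring, pvG_succ]
      rw [e]
      exact ih (k + 1) (by omega) (by omega)

theorem pvB_part2 (magic : Int) (mu lam : Nat) (h : pvSpecLM magic mu lam) :
    run_activation_system_alt magic false = pvG magic (mu + lam - 1) := by
  classical
  have hl := h.1
  -- a multiple of lam past mu, where tortoise and hare must meet
  have hge : mu ≤ (mu / lam + 1) * lam := by
    have h1 := Nat.div_add_mod mu lam
    have h2 := Nat.mod_lt mu hl
    have h3 : (mu / lam + 1) * lam = lam * (mu / lam) + lam := by ring
    omega
  have histar : pvG magic (2 * ((mu / lam + 1) * lam)) = pvG magic ((mu / lam + 1) * lam) := by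
    rw [show 2 * ((mu / lam + 1) * lam) = ((mu / lam + 1) * lam) + (mu / lam + 1) * lam by ring]
    exact pv_per_mul magic mu lam h (mu / lam + 1) _ hge
  have histar1 : 1 ≤ (mu / lam + 1) * lam := Nat.mul_pos (Nat.succ_pos _) hl
  have histarle : (mu / lam + 1) * lam ≤ mu + lam := by
    have h1 : mu / lam * lam ≤ mu := Nat.div_mul_le_self mu lam
    have h3 : (mu / lam + 1) * lam = mu / lam * lam + lam := by ring
    omega
  have hM : ∃ j, 1 ≤ j ∧ pvG magic (2 * j) = pvG magic j := ⟨_, histar1, histar⟩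
  obtain ⟨hmt1, hmteq⟩ := Nat.find_spec hM
  have hmtmin : ∀ j, 1 ≤ j → pvG magic (2 * j) = pvG magic j → Nat.find hM ≤ j :=
    fun j a b => Nat.find_min' hM ⟨a, b⟩
  have hmtle : Nat.find hM ≤ mu + lam := le_trans (hmtmin _ histar1 histar) histarle
  have hbound := pv_mulam_le magic mu lam h
  have hdvd : lam ∣ Nat.find hM := by
    have hmu_mt : mu ≤ Nat.find hM :=
      pv_ge_mu_of_eq magic mu lam h (Nat.find hM) (2 * Nat.find hM) (by omega) hmteq.symm
    have := pv_dvd_of_eq magic mu lam h (Nat.find hM) (2 * Nat.find hM) hmu_mt (by omega) hmteq.symm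
    rwa [show 2 * Nat.find hM - Nat.find hM = Nat.find hM by omega] at this
  have hmeet : pvMeet magic (pvStep magic (pvStep magic 0))
      (pvStep magic (pvStep magic (pvStep magic 0))) 16777218 = pvG magic (Nat.find hM) := by
    have := pvMeet_inv magic mu lam (Nat.find hM) h hmt1 hmteq hmtmin 16777218 1
      (by omega) (by omega) (by omega)
    rw [show (2 * 1 : Nat) = 2 from rfl] at this
    exact this
  have hfind : pvFindMu magic (pvStep magic 0) (pvG magic (Nat.find hM)) 16777218 = pvG magic mu := by
    have := pvFindMu_inv magic mu lam (Nat.find hM) h hmt1 hdvd 16777218 0 (by omega) (by omega)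
    rw [Nat.zero_add] at this
    exact this
  simp only [run_activation_system_alt, Bool.false_eq_true, if_false]
  rw [hmeet, hfind]
  have := pvPred_inv magic mu lam h 16777218 0 hl (by omega)
  rwa [show mu + 0 = mu from rfl] at this

-- ===== VERDICT (by name: the statement is the Claim_ definition above) =====
theorem run_activation_system_spec : Claim_equal_run_activation_system := by
  intro magic p1 _
  unfold Spec_run_activation_system
  cases p1 with
  | true =>
    show pvOuterA magic true PySem.Set.empty 0 (-1) 16777218 = _
    rw [show (16777218 : Nat) = 16777217 + 1 from rfl]
    simp [pvOuterA, run_activation_system_alt, pvStep, pvInnerA_eq_pvStepGo]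
  | false =>
    obtain ⟨mu, lam, h⟩ := pvSpecLM_exists magic
    rw [pvA_part2 magic mu lam h, pvB_part2 magic mu lam h]
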